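-- pv_equiv track=rewrite | github.com/ptcharliechen/md-tools-pt | lmp2xdat.py | rearange
-- ===== SOURCE A (Python) =====
-- def rearange(AtomInfo):
--     IndexDict, EleNum = {}, {}
--     elements = []
--
--     for val in AtomInfo.values():
--         if val[0] not in elements:
--             elements.append(val[0])
--     idx = 0
--     for element in elements:
--         for key, val in AtomInfo.items():
--             if element == val[0]:
--                 IndexDict[idx] = key
--                 EleNum[element] = 1 if element not in EleNum.keys() else EleNum[element] + 1
--                 idx += 1
--     return EleNum, IndexDict
-- ===== SOURCE B (Python) =====
-- def rearange(AtomInfo):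
--     # One pass: group keys by their element (dicts preserve first-appearance order),
--     # then read the counts and the concatenated key order straight off the groups.
--     groups = {}
--     for key, val in AtomInfo.items():
--         groups.setdefault(val[0], []).append(key)
--     EleNum = {e: len(ks) for e, ks in groups.items()}
--     order = [k for ks in groups.values() for k in ks]
--     IndexDict = dict(enumerate(order))
--     return EleNum, IndexDict
-- ===== Notes on version B (the rewrite author's own statement) =====
-- stated objective: faster
-- what changed: A first collects the distinct elements and then rescans the whole dict once per element; B makes a single pass that groups keys into per-element lists in a dict and derives both counts and the index order from that grouping.
import Mathlib
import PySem

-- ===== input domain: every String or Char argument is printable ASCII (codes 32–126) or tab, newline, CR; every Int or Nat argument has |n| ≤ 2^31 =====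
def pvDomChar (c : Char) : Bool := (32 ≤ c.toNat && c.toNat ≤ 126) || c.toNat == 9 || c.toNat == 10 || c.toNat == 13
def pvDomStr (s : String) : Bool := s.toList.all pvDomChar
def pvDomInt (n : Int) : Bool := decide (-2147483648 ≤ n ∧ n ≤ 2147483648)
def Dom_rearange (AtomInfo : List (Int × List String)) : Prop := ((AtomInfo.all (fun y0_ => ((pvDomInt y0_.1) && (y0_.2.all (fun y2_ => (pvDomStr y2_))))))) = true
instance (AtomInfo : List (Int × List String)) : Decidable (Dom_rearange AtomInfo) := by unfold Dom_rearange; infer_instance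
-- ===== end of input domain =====

-- B replaces A's rescan of the whole dict once per distinct element by a single
-- grouping pass (element -> ordered list of keys); objective: faster.

-- val[0] (used by both programs); total form, only relevant under Pre_ (nonempty value lists)
def hd0 (l : List String) : String := (PySem.List.pyGet? l 0).getD ""

-- ===== PORT A =====
def rearange (AtomInfo : List (Int × List String)) : (List (String × Int)) × (List (Int × Int)) :=
  let elements : List String :=
    AtomInfo.foldl (fun es kv => if es.contains (hd0 kv.2) then es else es ++ [hd0 kv.2]) []
  let st :=
    elements.foldl (fun st element =>
      AtomInfo.foldl (fun (st : PySem.Dict String Int × PySem.Dict Int Int × Int) kv =>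
        if element == hd0 kv.2 then
          (st.1.insert element (match st.1.get? element with | none => 1 | some n => n + 1),
           st.2.1.insert st.2.2 kv.1,
           st.2.2 + 1)
        else st) st)
      ((PySem.Dict.empty : PySem.Dict String Int), (PySem.Dict.empty : PySem.Dict Int Int), (0 : Int))
  (st.1.items, st.2.1.items)

-- ===== PORT B =====
def rearange_alt (AtomInfo : List (Int × List String)) : (List (String × Int)) × (List (Int × Int)) :=
  let groups : PySem.Dict String (List Int) :=
    AtomInfo.foldl (fun g kv => g.modify (hd0 kv.2) [] (· ++ [kv.1])) PySem.Dict.empty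
  let eleNum : PySem.Dict String Int :=
    PySem.Dict.ofList (groups.items.map (fun p => (p.1, (p.2.length : Int))))
  let order : List Int := groups.values.flatMap (fun ks => ks)
  let indexDict : PySem.Dict Int Int := PySem.Dict.ofList (PySem.List.enumerate order 0)
  (eleNum.items, indexDict.items)

-- ===== PRECONDITION & SPEC =====
-- Pre_ excludes exactly the inputs where some value list is empty: there Python A
-- raises IndexError on val[0].
def Pre_rearange (AtomInfo : List (Int × List String)) : Prop :=
  ∀ kv ∈ AtomInfo, kv.2 ≠ []
instance (AtomInfo : List (Int × List String)) : Decidable (Pre_rearange AtomInfo) := by unfold Pre_rearange; infer_instance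
def pvWitness_rearange : (List (Int × List String)) :=
  [(1, ["O", "a"]), (2, ["H"]), (3, ["O"])]

def Spec_rearange (AtomInfo : List (Int × List String)) (out : (List (String × Int)) × (List (Int × Int))) : Prop := out = rearange_alt AtomInfo
instance (AtomInfo : List (Int × List String)) (out : (List (String × Int)) × (List (Int × Int))) : Decidable (Spec_rearange AtomInfo out) := by unfold Spec_rearange; infer_instance

-- ===== CLAIM (what is proved, stated in full; the proofs are below) =====
def Claim_equal_rearange : Prop := ∀ (AtomInfo : List (Int × List String)), Dom_rearange AtomInfo → Pre_rearange AtomInfo → Spec_rearange AtomInfo (rearange AtomInfo)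

-- ===== LEMMAS AND PROOFS =====

def keysOf (xs : List (Int × List String)) (e : String) : List Int :=
  (xs.filter (fun kv => hd0 kv.2 == e)).map (·.1)
def headsOf (xs : List (Int × List String)) : List String := xs.map (fun kv => hd0 kv.2)

theorem groups_items (xs : List (Int × List String)) :
    (xs.foldl (fun g kv => g.modify (hd0 kv.2) [] (· ++ [kv.1])) PySem.Dict.empty).items
      = (PySem.Set.ofList (headsOf xs)).map (fun e => (e, keysOf xs e)) := by
  have hkeys : (xs.foldl (fun g kv => g.modify (hd0 kv.2) [] (· ++ [kv.1]))
      (PySem.Dict.empty : PySem.Dict String (List Int))).keys = PySem.Set.ofList (headsOf xs) := by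
    have := PySem.Dict.keys_foldl_modify_key xs (fun kv => hd0 kv.2) []
      (fun _ kv => (· ++ [kv.1])) (PySem.Dict.empty : PySem.Dict String (List Int))
    simpa [headsOf, PySem.Set.update_nil_left, PySem.Dict.keys_empty] using this
  have hnd : (xs.foldl (fun g kv => g.modify (hd0 kv.2) [] (· ++ [kv.1]))
      (PySem.Dict.empty : PySem.Dict String (List Int))).keys.Nodup := by
    rw [hkeys]; exact PySem.Set.nodup_ofList _
  rw [PySem.Dict.items_eq_map_keys _ hnd [], hkeys]
  refine List.map_congr_left ?_
  intro e he
  have hfold : (xs.foldl (fun g kv => g.modify (hd0 kv.2) [] (· ++ [kv.1]))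
      (PySem.Dict.empty : PySem.Dict String (List Int)))
      = ((xs.map (fun kv => (hd0 kv.2, kv.1))).foldl
          (fun d p => d.modify p.1 [] (· ++ [p.2])) PySem.Dict.empty) := by
    rw [List.foldl_map]
  rw [hfold]
  have := PySem.Dict.getD_foldl_modify_append (xs.map (fun kv => (hd0 kv.2, kv.1)))
      (PySem.Dict.empty : PySem.Dict String (List Int)) e
  rw [this]
  simp [keysOf, PySem.Dict.getD_empty, List.filter_map, List.map_map, Function.comp_def]

theorem keysOf_cons (x : Int × List String) (xs : List (Int × List String)) (e : String) :
    keysOf (x :: xs) e = if hd0 x.2 == e then x.1 :: keysOf xs e else keysOf xs e := by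
  simp only [keysOf, List.filter_cons]
  split_ifs <;> simp_all

theorem get?_append_skip {κ ν : Type} [BEq κ] [LawfulBEq κ] (e : κ) (rest : List (κ × ν)) :
    ∀ (base : List (κ × ν)), (∀ p ∈ base, p.1 ≠ e) →
    (PySem.Dict.mk (base ++ rest)).get? e = (PySem.Dict.mk rest).get? e := by
  intro base
  induction base with
  | nil => intro _; rfl
  | cons b bs ih =>
    intro h
    rw [List.cons_append, PySem.Dict.get?_mk_cons]
    have hb : (b.1 == e) = false := by
      simpa using (h b (List.mem_cons_self))
    rw [hb]
    · simp only [Bool.false_eq_true, if_false]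
      exact ih (fun p hp => h p (List.mem_cons_of_mem _ hp))

def stepA (element : String) (st : PySem.Dict String Int × PySem.Dict Int Int × Int)
    (kv : Int × List String) : PySem.Dict String Int × PySem.Dict Int Int × Int :=
  if element == hd0 kv.2 then
    (st.1.insert element (match st.1.get? element with | none => 1 | some n => n + 1),
     st.2.1.insert st.2.2 kv.1,
     st.2.2 + 1)
  else st

theorem innerA (e : String) (xs : List (Int × List String)) :
    ∀ (base : List (String × Int)) (copt : Option Int) (idd : PySem.Dict Int Int) (i : Int),
    (∀ p ∈ base, p.1 ≠ e) → (∀ p ∈ idd.items, p.1 < i) →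
    xs.foldl (stepA e)
        (PySem.Dict.mk (base ++ (copt.elim [] (fun c => [(e, c)]))), idd, i)
      = (PySem.Dict.mk (base ++
            (if keysOf xs e = [] then copt.elim [] (fun c => [(e, c)])
             else [(e, copt.elim 0 id + (keysOf xs e).length)])),
         PySem.Dict.mk (idd.items ++ PySem.List.enumerate (keysOf xs e) i),
         i + (keysOf xs e).length) := by
  induction xs with
  | nil =>
    intro base copt idd i hbase hidd
    simp [keysOf]
  | cons x xs ih =>
    intro base copt idd i hbase hidd
    rw [List.foldl_cons, keysOf_cons]
    by_cases hx : hd0 x.2 = e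
    · -- matching entry
      have hcond : (e == hd0 x.2) = true := by simp [hx]
      have hx' : (hd0 x.2 == e) = true := by simp [hx]
      have hiddins : (idd.insert i x.1) = PySem.Dict.mk (idd.items ++ [(i, x.1)]) := by
        rw [PySem.Dict.insert]
        have hc : idd.contains i = false := by
          rw [PySem.Dict.contains_eq_isSome_get?, PySem.Dict.get?]
          have hf : idd.items.find? (fun p => p.1 == i) = none := by
            rw [List.find?_eq_none]
            intro p hp
            have := hidd p hp
            simp only [beq_iff_eq]
            omega
          simp [hf]
        simp [hc]
      have hidd' : ∀ p ∈ (PySem.Dict.mk (idd.items ++ [(i, x.1)])).items, p.1 < i + 1 := by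
        intro p hp
        rcases List.mem_append.mp hp with h | h
        · have := hidd p h; omega
        · rw [List.mem_singleton] at h; subst h; show i < i + 1; omega
      have hget : ∀ rest, (PySem.Dict.mk (base ++ rest)).get? e = (PySem.Dict.mk rest).get? e :=
        fun rest => get?_append_skip e rest base hbase
      have hbase' : ∀ (v : Int), List.map (fun p => if (p.1 == e) = true then (e, v) else p) base = base := by
        intro v
        calc List.map (fun p => if (p.1 == e) = true then (e, v) else p) base
            = List.map id base := List.map_congr_left (fun p hp => by
              have : (p.1 == e) = false := by simpa using hbase p hp
              simp [this])
          _ = base := List.map_id base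
      have hins0 : ∀ (v : Int), (PySem.Dict.mk (base ++ [])).insert e v
          = PySem.Dict.mk (base ++ [(e, v)]) := by
        intro v
        rw [PySem.Dict.insert, PySem.Dict.contains_eq_isSome_get?, hget]
        simp [PySem.Dict.get?]
      have hins1 : ∀ (c v : Int), (PySem.Dict.mk (base ++ [(e, c)])).insert e v
          = PySem.Dict.mk (base ++ [(e, v)]) := by
        intro c v
        rw [PySem.Dict.insert, PySem.Dict.contains_eq_isSome_get?, hget]
        rw [PySem.Dict.get?_mk_cons]
        simp only [beq_self_eq_true, if_true, Option.isSome_some]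
        congr 1
        rw [List.map_append, hbase']
        simp
      cases copt with
      | none =>
        have hstep : stepA e (PySem.Dict.mk (base ++ (Option.elim none [] (fun c => [(e, c)]))), idd, i) x
            = (PySem.Dict.mk (base ++ [(e, 1)]), PySem.Dict.mk (idd.items ++ [(i, x.1)]), i + 1) := by
          simp only [stepA, hcond, if_true, Option.elim]
          rw [hiddins]
          have hg : (PySem.Dict.mk (base ++ ([] : List (String × Int)))).get? e = none := by
            rw [hget]; simp [PySem.Dict.get?]
          rw [hg, hins0 1]
        rw [hstep]
        have hrec := ih base (some 1) (PySem.Dict.mk (idd.items ++ [(i, x.1)])) (i + 1) hbase hidd'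
        simp only [Option.elim] at hrec
        rw [hrec]
        rw [hx']
        simp only [if_true]
        refine congrArg₂ _ ?_ (congrArg₂ _ ?_ ?_)
        · congr 1
          have : (x.1 :: keysOf xs e) ≠ [] := by simp
          rw [if_neg this]
          split_ifs with h <;> simp [h] <;> push_cast <;> ring
        · rw [PySem.List.enumerate_cons, List.append_assoc]; rfl
        · simp only [List.length_cons]; push_cast; ring
      | some c =>
        have hstep : stepA e (PySem.Dict.mk (base ++ (Option.elim (some c) [] (fun c => [(e, c)]))), idd, i) x
            = (PySem.Dict.mk (base ++ [(e, c + 1)]), PySem.Dict.mk (idd.items ++ [(i, x.1)]), i + 1) := by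
          simp only [stepA, hcond, if_true, Option.elim]
          rw [hiddins]
          have hg : (PySem.Dict.mk (base ++ [(e, c)])).get? e = some c := by
            rw [hget]; simp [PySem.Dict.get?_mk_cons]
          rw [hg, hins1 c (c + 1)]
        rw [hstep]
        have hrec := ih base (some (c + 1)) (PySem.Dict.mk (idd.items ++ [(i, x.1)])) (i + 1) hbase hidd'
        simp only [Option.elim] at hrec
        rw [hrec]
        rw [hx']
        simp only [if_true]
        refine congrArg₂ _ ?_ (congrArg₂ _ ?_ ?_)
        · congr 1
          have : (x.1 :: keysOf xs e) ≠ [] := by simp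
          rw [if_neg this]
          split_ifs with h <;> simp [h] <;> push_cast <;> ring
        · rw [PySem.List.enumerate_cons, List.append_assoc]; rfl
        · simp only [List.length_cons]; push_cast; ring
    · have hcond : (e == hd0 x.2) = false := by simp [Ne.symm hx]
      have hx' : (hd0 x.2 == e) = false := by simp [hx]
      simp only [stepA, hcond, Bool.false_eq_true, if_false, hx']
      exact ih base copt idd i hbase hidd

theorem mem_enumerate_lt {α : Type} (ks : List α) (i : Int) (p : Int × α)
    (hp : p ∈ PySem.List.enumerate ks i) : p.1 < i + ks.length := by
  rcases (PySem.List.mem_enumerate_iff ks i p).mp hp with ⟨k, hk, rfl⟩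
  simp only []
  omega

theorem outerA (xs : List (Int × List String)) :
    ∀ (es : List String), es.Nodup → (∀ e ∈ es, keysOf xs e ≠ []) →
    ∀ (en : PySem.Dict String Int) (idd : PySem.Dict Int Int) (i : Int),
    (∀ e ∈ es, ∀ p ∈ en.items, p.1 ≠ e) → (∀ p ∈ idd.items, p.1 < i) →
    es.foldl (fun st e => xs.foldl (stepA e) st) (en, idd, i)
      = (PySem.Dict.mk (en.items ++ es.map (fun e => (e, ((keysOf xs e).length : Int)))),
         PySem.Dict.mk (idd.items ++ PySem.List.enumerate (es.flatMap (keysOf xs)) i),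
         i + ((es.flatMap (keysOf xs)).length : Int)) := by
  intro es
  induction es with
  | nil =>
    intro _ _ en idd i _ _
    simp
  | cons e es ih =>
    intro hnd hne en idd i hen hidd
    rw [List.foldl_cons]
    have h1 := innerA e xs en.items none idd i (hen e List.mem_cons_self) hidd
    have hen_eta : (PySem.Dict.mk en.items) = en := rfl
    simp only [Option.elim, List.append_nil] at h1
    rw [if_neg (hne e List.mem_cons_self), hen_eta] at h1
    rw [h1]
    have hnd' : es.Nodup := (List.nodup_cons.mp hnd).2
    have hne' : ∀ e' ∈ es, keysOf xs e' ≠ [] := fun e' h => hne e' (List.mem_cons_of_mem _ h)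
    have hen' : ∀ e' ∈ es, ∀ p ∈ (PySem.Dict.mk (en.items ++ [(e, 0 + ((keysOf xs e).length : Int))])).items,
        p.1 ≠ e' := by
      intro e' he' p hp
      rcases List.mem_append.mp hp with h | h
      · exact hen e' (List.mem_cons_of_mem _ he') p h
      · rw [List.mem_singleton] at h; subst h
        show e ≠ e'
        exact fun hcon => (List.nodup_cons.mp hnd).1 (hcon ▸ he')
    have hidd' : ∀ p ∈ (PySem.Dict.mk (idd.items ++ PySem.List.enumerate (keysOf xs e) i)).items,
        p.1 < i + ((keysOf xs e).length : Int) := by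
      intro p hp
      rcases List.mem_append.mp hp with h | h
      · have := hidd p h; omega
      · exact mem_enumerate_lt _ _ _ h
    rw [ih hnd' hne' _ _ _ hen' hidd']
    refine congrArg₂ _ ?_ (congrArg₂ _ ?_ ?_)
    · simp
    · simp only [List.flatMap_cons, PySem.List.enumerate_append, List.append_assoc]
    · simp only [List.flatMap_cons, List.length_append]
      push_cast
      ring

theorem items_ofList_nodup {κ ν : Type} [BEq κ] [LawfulBEq κ] (l : List (κ × ν))
    (h : (l.map Prod.fst).Nodup) : (PySem.Dict.ofList l).items = l := by
  have := PySem.Dict.items_foldl_insert_fresh l Prod.fst Prod.snd PySem.Dict.empty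
    (by intro a _; simp [PySem.Dict.contains_empty]) h
  simpa [PySem.Dict.ofList, PySem.Dict.update] using this

theorem elements_eq (xs : List (Int × List String)) :
    xs.foldl (fun es kv => if es.contains (hd0 kv.2) then es else es ++ [hd0 kv.2]) []
      = PySem.Set.ofList (headsOf xs) := by
  have h := PySem.Set.update_map_eq_foldl_add xs (fun kv => hd0 kv.2) []
  rw [PySem.Set.update_nil_left] at h
  simp only [PySem.Set.add, PySem.Set.contains] at h
  rw [headsOf]
  exact h.symm

theorem elements_nonempty (xs : List (Int × List String)) :
    ∀ e ∈ PySem.Set.ofList (headsOf xs), keysOf xs e ≠ [] := by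
  intro e he
  rw [PySem.Set.mem_ofList] at he
  rcases List.mem_map.mp he with ⟨kv, hkv, heq⟩
  have hmem : kv ∈ xs.filter (fun kv => hd0 kv.2 == e) :=
    List.mem_filter.mpr ⟨hkv, by simp [heq]⟩
  have : kv.1 ∈ keysOf xs e := List.mem_map.mpr ⟨kv, hmem, rfl⟩
  exact List.ne_nil_of_mem this

theorem enumerate_fst_nodup {α : Type} (ks : List α) (s : Int) :
    ((PySem.List.enumerate ks s).map Prod.fst).Nodup := by
  have hpw := PySem.List.pairwise_lt_enumerate ks s
  have : ((PySem.List.enumerate ks s).map Prod.fst).Pairwise (· < ·) :=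
    List.pairwise_map.mpr hpw
  exact this.imp ne_of_lt

theorem main_eq (xs : List (Int × List String)) : rearange xs = rearange_alt xs := by
  have hA : rearange xs
      = (((xs.foldl (fun es kv => if es.contains (hd0 kv.2) then es else es ++ [hd0 kv.2]) []).foldl
            (fun st e => xs.foldl (stepA e) st)
            ((PySem.Dict.empty : PySem.Dict String Int), (PySem.Dict.empty : PySem.Dict Int Int), (0 : Int))).1.items,
         ((xs.foldl (fun es kv => if es.contains (hd0 kv.2) then es else es ++ [hd0 kv.2]) []).foldl
            (fun st e => xs.foldl (stepA e) st)
            ((PySem.Dict.empty : PySem.Dict String Int), (PySem.Dict.empty : PySem.Dict Int Int), (0 : Int))).2.1.items) := rfl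
  rw [hA, elements_eq]
  have houter := outerA xs (PySem.Set.ofList (headsOf xs)) (PySem.Set.nodup_ofList _)
    (elements_nonempty xs) PySem.Dict.empty PySem.Dict.empty 0
    (by intro e _ p hp; simp [PySem.Dict.empty] at hp) (by intro p hp; simp [PySem.Dict.empty] at hp)
  rw [houter]
  -- B side
  rw [rearange_alt, PySem.Dict.values, groups_items]
  have hfst : (((PySem.Set.ofList (headsOf xs)).map (fun e => (e, keysOf xs e))).map
      (fun p => (p.1, (p.2.length : Int)))).map Prod.fst = PySem.Set.ofList (headsOf xs) := by
    simp [List.map_map, Function.comp_def]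
  have h1 := items_ofList_nodup
    (((PySem.Set.ofList (headsOf xs)).map (fun e => (e, keysOf xs e))).map (fun p => (p.1, (p.2.length : Int))))
    (by rw [hfst]; exact PySem.Set.nodup_ofList _)
  rw [h1]
  have h2 := items_ofList_nodup
    (PySem.List.enumerate ((((PySem.Set.ofList (headsOf xs)).map (fun e => (e, keysOf xs e))).map (fun x => x.2)).flatMap (fun ks => ks)) 0)
    (enumerate_fst_nodup _ 0)
  rw [h2]
  simp [List.map_map, Function.comp_def, List.flatMap_map, PySem.Dict.empty]

-- ===== VERDICT (by name: the statement is the Claim_ definition above) =====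
theorem rearange_spec : Claim_equal_rearange := by
  intro AtomInfo _ _
  unfold Spec_rearange
  exact main_eq AtomInfo
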